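-- pv_equiv track=rewrite | github.com/bailiff48/LEDMatrix | src/golf_manager.py | _shorten_tournament_name
-- ===== SOURCE A (Python) =====
-- def _shorten_tournament_name(name: str) -> str:
--     """
--     Shorten tournament name for display.
--
--     Args:
--         name: Full tournament name
--
--     Returns:
--         Shortened name
--     """
--     # Common abbreviations
--     replacements = {
--         'Championship': 'Champ',
--         'Tournament': 'Tourn',
--         'presented by': 'pres.',
--         'Presented by': 'pres.',
--         'Open': 'Open',
--         'Classic': 'Classic',
--         'Invitational': 'Inv',
--         'International': "Int'l",
--         'DP World Tour': 'DPWT',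
--     }
--
--     short_name = name
--     for old, new in replacements.items():
--         short_name = short_name.replace(old, new)
--
--     # Limit length
--     if len(short_name) > 30:
--         short_name = short_name[:27] + "..."
--
--     return short_name
-- ===== SOURCE B (Python) =====
-- def _shorten_tournament_name(name: str) -> str:
--     # Single left-to-right scan: at each position try the abbreviations in
--     # order and emit the replacement for the first key that matches there.
--     pairs = [
--         ('Championship', 'Champ'),
--         ('Tournament', 'Tourn'),
--         ('presented by', 'pres.'),
--         ('Presented by', 'pres.'),
--         ('Open', 'Open'),
--         ('Classic', 'Classic'),
--         ('Invitational', 'Inv'),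
--         ('International', "Int'l"),
--         ('DP World Tour', 'DPWT'),
--     ]
--     out = []
--     i = 0
--     n = len(name)
--     while i < n:
--         for old, new in pairs:
--             if name.startswith(old, i):
--                 out.append(new)
--                 i += len(old)
--                 break
--         else:
--             out.append(name[i])
--             i += 1
--     short_name = ''.join(out)
--     if len(short_name) > 30:
--         short_name = short_name[:27] + "..."
--     return short_name
-- ===== Notes on version B (the rewrite author's own statement) =====
-- stated objective: alternative
-- what changed: Replaces the nine sequential full str.replace passes with a single left-to-right scan that, at each position, tries the replacement keys in order and emits the substitution for the first key matching there; Pre_ excludes names containing an overlapping or cascading partial-key-followed-by-key substring, where sequential replacement and a single scan legitimately diverge and neither result is specified.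
-- outside the precondition, e.g. on _shorten_tournament_name('DP World Tournament'): A returns 'DPWTn', B returns 'DPWTnament'; on _shorten_tournament_name('Championshipresented by'): A returns 'Champres.', B returns 'Champresented by'
import Mathlib
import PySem

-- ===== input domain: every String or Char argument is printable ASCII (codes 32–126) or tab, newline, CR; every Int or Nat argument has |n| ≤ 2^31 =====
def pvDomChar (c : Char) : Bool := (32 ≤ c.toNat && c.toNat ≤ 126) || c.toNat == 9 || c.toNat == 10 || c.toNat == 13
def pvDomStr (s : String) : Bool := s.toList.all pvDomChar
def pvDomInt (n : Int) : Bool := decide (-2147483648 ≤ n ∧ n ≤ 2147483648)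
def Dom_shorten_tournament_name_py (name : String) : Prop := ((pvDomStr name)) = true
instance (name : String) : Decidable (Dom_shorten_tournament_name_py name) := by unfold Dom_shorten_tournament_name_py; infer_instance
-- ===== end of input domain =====

set_option maxRecDepth 40000


-- B replaces A's nine sequential full str.replace passes by a single left-to-right scan
-- (first matching key at each position); equal on Pre_, which excludes names containing
-- an overlapping/cascading partial-key-followed-by-key substring where the two strategies
-- legitimately diverge.

-- ===== PORT A =====
def pvStrPairs : List (String × String) :=
  [("Championship", "Champ"), ("Tournament", "Tourn"), ("presented by", "pres."),
   ("Presented by", "pres."), ("Open", "Open"), ("Classic", "Classic"),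
   ("Invitational", "Inv"), ("International", "Int'l"), ("DP World Tour", "DPWT")]

def shorten_tournament_name_py (name : String) : String :=
  let short_name := pvStrPairs.foldl (fun s p => PySem.Str.replace s p.1 p.2) name
  if PySem.Str.len short_name > 30 then PySem.Str.slice short_name none (some 27) ++ "..." else short_name

-- ===== PORT B =====
def pvPairs : List (List Char × List Char) := pvStrPairs.map (fun p => (p.1.toList, p.2.toList))

-- the single left-to-right scan of Source B (keys are nonempty, so `t.drop (k.length - 1)`
-- is exactly Python's `i += len(old)` continuation)
def pvOnePass : List Char → List Char
  | [] => []
  | c :: t =>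
    match pvPairs.find? (fun p => p.1.isPrefixOf (c :: t)) with
    | some (k, r) => r ++ pvOnePass (t.drop (k.length - 1))
    | none => c :: pvOnePass t
termination_by s => s.length
decreasing_by all_goals simp

def shorten_tournament_name_py_alt (name : String) : String :=
  let short_name := String.ofList (pvOnePass name.toList)
  if PySem.Str.len short_name > 30 then PySem.Str.slice short_name none (some 27) ++ "..." else short_name

-- ===== PRECONDITION & SPEC =====
def pvKeyStrs : List (List Char) := pvPairs.map (·.1)

-- Pre_ excludes names containing an overlapping or cascading partial-key-followed-by-key
-- substring, on which A's sequential-cascade result and B's single-scan result are both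
-- defensible and neither is specified.
def Pre_shorten_tournament_name_py (name : String) : Prop :=
  ∀ k ∈ pvKeyStrs, ∀ k' ∈ pvKeyStrs, ∀ l ∈ List.range' 1 k.length, ¬ (k.take l ++ k') <:+: name.toList
instance (name : String) : Decidable (Pre_shorten_tournament_name_py name) := by
  unfold Pre_shorten_tournament_name_py; infer_instance

def pvWitness_shorten_tournament_name_py : String := "BMW PGA Open"

def Spec_shorten_tournament_name_py (name : String) (out : String) : Prop := out = shorten_tournament_name_py_alt name
instance (name : String) (out : String) : Decidable (Spec_shorten_tournament_name_py name out) := by unfold Spec_shorten_tournament_name_py; infer_instance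

-- ===== CLAIM (what is proved, stated in full; the proofs are below) =====
def Claim_equal_shorten_tournament_name_py : Prop := ∀ (name : String), Dom_shorten_tournament_name_py name → Pre_shorten_tournament_name_py name → Spec_shorten_tournament_name_py name (shorten_tournament_name_py name)

-- ===== LEMMAS AND PROOFS =====

-- all strings "prefix of a key ++ key": wherever A and B can differ, one of these occurs
def pvHazards : List (List Char) :=
  pvKeyStrs.flatMap (fun k =>
    (List.range' 1 k.length).flatMap (fun l => pvKeyStrs.map (fun k' => k.take l ++ k')))

-- A's `str.replace old new` (old ≠ ''), as plain recursion on the string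
def pvRepl (k r : List Char) : List Char → List Char
  | [] => []
  | c :: t =>
    if k.isPrefixOf (c :: t) then r ++ pvRepl k r (t.drop (k.length - 1)) else c :: pvRepl k r t
termination_by s => s.length
decreasing_by all_goals simp

lemma pvRepl_nil (k r : List Char) : pvRepl k r [] = [] := by rw [pvRepl]

lemma pvRepl_cons (k r : List Char) (c : Char) (t : List Char) :
    pvRepl k r (c :: t) =
      if k.isPrefixOf (c :: t) then r ++ pvRepl k r (t.drop (k.length - 1))
      else c :: pvRepl k r t := by
  rw [pvRepl]

lemma pv_go_eq (k r : List Char) (hk : k ≠ []) :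
    ∀ fuel (l acc : List Char), l.length ≤ fuel →
      PySem.Chars.replace.go k r fuel l acc = acc.reverse ++ pvRepl k r l := by
  intro fuel
  induction fuel with
  | zero =>
    intro l acc h
    have hl : l = [] := List.length_eq_zero_iff.mp (Nat.le_zero.mp h)
    subst hl
    simp [PySem.Chars.replace.go, pvRepl_nil]
  | succ n ih =>
    intro l acc h
    cases l with
    | nil => simp [PySem.Chars.replace.go, pvRepl_nil]
    | cons c t =>
      have hk1 : 1 ≤ k.length := by
        cases k with
        | nil => exact absurd rfl hk
        | cons a b => simp
      have hgo : PySem.Chars.replace.go k r (n+1) (c :: t) acc =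
          if k.isPrefixOf (c :: t) then
            PySem.Chars.replace.go k r n (List.drop k.length (c :: t)) (r.reverse ++ acc)
          else PySem.Chars.replace.go k r n t (c :: acc) := rfl
      rw [hgo, pvRepl_cons]
      by_cases hpre : k.isPrefixOf (c :: t)
      · rw [if_pos hpre, if_pos hpre]
        have hdrop : List.drop k.length (c :: t) = t.drop (k.length - 1) := by
          cases k with
          | nil => exact absurd rfl hk
          | cons a k' => simp
        have hlen : (List.drop k.length (c :: t)).length ≤ n := by
          simp only [List.length_drop, List.length_cons] at *
          omega
        rw [ih _ _ hlen, hdrop]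
        simp
      · rw [if_neg hpre, if_neg hpre]
        have hlen : t.length ≤ n := by simp at h; omega
        rw [ih _ _ hlen]
        simp

lemma pv_replace_eq (s k r : List Char) (hk : k ≠ []) :
    PySem.Chars.replace s k r = pvRepl k r s := by
  have hemp : k.isEmpty = false := by
    cases k with
    | nil => exact absurd rfl hk
    | cons a b => rfl
  unfold PySem.Chars.replace
  rw [hemp]
  simp only [Bool.false_eq_true, if_false]
  rw [pv_go_eq k r hk s.length s [] le_rfl]
  simp

-- prefix push-back through one replace pass
lemma pvRepl_prefix_back (k r : List Char) :
    ∀ (u x : List Char), x ≠ [] → x <+: pvRepl k r u →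
      x <+: u ∨ ∃ j, j < x.length ∧ (x.take j ++ k) <+: u
  | [], x, hx, h => by
    rw [pvRepl_nil] at h
    exact absurd (List.prefix_nil.mp h) hx
  | c :: t, x, hx, h => by
    by_cases hpre : k.isPrefixOf (c :: t)
    · refine Or.inr ⟨0, ?_, ?_⟩
      · cases x with
        | nil => exact absurd rfl hx
        | cons a b => simp
      · simpa using List.isPrefixOf_iff_prefix.mp hpre
    · rw [pvRepl_cons, if_neg hpre] at h
      cases x with
      | nil => exact absurd rfl hx
      | cons a x' =>
        rw [List.cons_prefix_cons] at h
        obtain ⟨rfl, h'⟩ := h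
        by_cases hx' : x' = []
        · subst hx'
          exact Or.inl (by simp)
        · rcases pvRepl_prefix_back k r t x' hx' h' with h1 | ⟨j, hj, hp⟩
          · exact Or.inl (List.cons_prefix_cons.mpr ⟨rfl, h1⟩)
          · refine Or.inr ⟨j + 1, by simp; omega, ?_⟩
            rw [List.take_succ_cons, List.cons_append]
            exact List.cons_prefix_cons.mpr ⟨rfl, hp⟩

lemma pvRepl_append (k r : List Char) : ∀ (a w : List Char),
    (∀ d, d < a.length → ¬ k <+: (a.drop d ++ w)) →
    pvRepl k r (a ++ w) = a ++ pvRepl k r w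
  | [], w, _ => by simp
  | c :: a, w, h => by
    have h0 : ¬ k.isPrefixOf (c :: (a ++ w)) := by
      intro hc
      exact h 0 (by simp) (by simpa using List.isPrefixOf_iff_prefix.mp hc)
    rw [List.cons_append, pvRepl_cons, if_neg h0,
        pvRepl_append k r a w (fun d hd => h (d+1) (by simp; omega))]
    simp

lemma pvRepl_head (k r w : List Char) (hk : k ≠ []) :
    pvRepl k r (k ++ w) = r ++ pvRepl k r w := by
  cases k with
  | nil => exact absurd rfl hk
  | cons c k' =>
    rw [List.cons_append, pvRepl_cons,
        if_pos (List.isPrefixOf_iff_prefix.mpr (by exact ⟨w, by simp⟩))]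
    congr 2
    simp

def pvBlockOK (b : List Char) : Prop := ∃ k ∈ pvKeyStrs, ∃ l, 1 ≤ l ∧ l ≤ k.length ∧ b = k.take l
def pvChainOK (bs : List (List Char)) : Prop :=
  (∀ b ∈ bs, pvBlockOK b) ∧ ∃ k ∈ pvKeyStrs, bs.getLast? = some k
def pvShape (x p : List Char) : Prop :=
  p = x ∨ ∃ j bs, j < x.length ∧ pvChainOK bs ∧ p = x.take j ++ bs.flatten

lemma pvKeys_ne_nil : ∀ k ∈ pvKeyStrs, k ≠ [] := by decide

lemma pvKeys_noinfix : ∀ k₁ ∈ pvKeyStrs, ∀ k₂ ∈ pvKeyStrs, k₁ ≠ k₂ → ¬ k₁ <:+: k₂ := by decide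

lemma pvKeys_nodup : (pvPairs.map (·.1)).Nodup := by decide

lemma pvAllKeys : ∀ p ∈ pvPairs, p.1 ∈ pvKeyStrs := fun p hp => List.mem_map.mpr ⟨p, hp, rfl⟩

lemma pvHaz_mem {k₁ k₂ : List Char} (h₁ : k₁ ∈ pvKeyStrs) (h₂ : k₂ ∈ pvKeyStrs)
    {l : Nat} (hl1 : 1 ≤ l) (hl2 : l ≤ k₁.length) : (k₁.take l ++ k₂) ∈ pvHazards := by
  unfold pvHazards
  rw [List.mem_flatMap]
  refine ⟨k₁, h₁, ?_⟩
  rw [List.mem_flatMap]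
  exact ⟨l, List.mem_range'_1.mpr ⟨hl1, by omega⟩, List.mem_map.mpr ⟨k₂, h₂, rfl⟩⟩

lemma pvChain_haz : ∀ (bs : List (List Char)), pvChainOK bs → 2 ≤ bs.length →
    ∃ h' ∈ pvHazards, h' <:+: bs.flatten
  | [], ⟨_, k, _, hlast⟩, _ => by simp at hlast
  | [b], _, h2 => by simp at h2
  | b :: b2 :: bs2, ⟨hall, k, hkmem, hlast⟩, _ => by
    cases bs2 with
    | nil =>
      have hb2 : b2 = k := by simpa using hlast
      subst hb2
      obtain ⟨k0, hk0, l, hl1, hl2, hb⟩ := hall b (by simp)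
      subst hb
      refine ⟨k0.take l ++ b2, pvHaz_mem hk0 hkmem hl1 hl2, ?_⟩
      simp
    | cons b3 bs3 =>
      obtain ⟨h', hm, hinf⟩ := pvChain_haz (b2 :: b3 :: bs3)
        ⟨fun y hy => hall y (List.mem_cons_of_mem _ hy), k, hkmem,
          by simpa [List.getLast?_cons_cons] using hlast⟩ (by simp)
      refine ⟨h', hm, ?_⟩
      rw [List.flatten_cons]
      exact hinf.trans (List.suffix_append _ _).isInfix

lemma pvChain_take : ∀ (bs : List (List Char)), (∀ b ∈ bs, pvBlockOK b) → ∀ (n : Nat),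
    ∃ bs' : List (List Char), (∀ b ∈ bs', pvBlockOK b) ∧ bs'.flatten = bs.flatten.take n
  | [], _, n => ⟨[], by simp, by simp⟩
  | b :: bs, hb, n => by
    by_cases hn : n ≤ b.length
    · by_cases h0 : n = 0
      · exact ⟨[], by simp, by simp [h0]⟩
      · obtain ⟨k0, hk0, l, hl1, hl2, hbe⟩ := hb b (by simp)
        refine ⟨[b.take n], ?_, ?_⟩
        · intro y hy
          simp only [List.mem_singleton] at hy
          subst hy
          refine ⟨k0, hk0, n, by omega, ?_, ?_⟩
          · have : b.length = min l k0.length := by rw [hbe]; simp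
            omega
          · rw [hbe, List.take_take, min_eq_left (by
              have : b.length = min l k0.length := by rw [hbe]; simp
              omega)]
        · rw [List.flatten_cons, List.flatten_cons, List.take_append_of_le_length hn]
          simp
    · obtain ⟨bs', hb', hf⟩ := pvChain_take bs (fun y hy => hb y (List.mem_cons_of_mem _ hy)) (n - b.length)
      refine ⟨b :: bs', fun y hy => ?_, ?_⟩
      · rcases List.mem_cons.mp hy with rfl | hy2
        · exact hb _ (by simp)
        · exact hb' y hy2
      · rw [List.flatten_cons, List.flatten_cons, hf, List.take_append,
            List.take_of_length_le (l := b) (by omega)]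

lemma pvShape_closed (k r x p v : List Char) (hk : k ∈ pvKeyStrs) (hx : x ≠ [])
    (hs : pvShape x p) (hp : p <+: pvRepl k r v) :
    ∃ p', pvShape x p' ∧ p' <+: v := by
  have hkblock : pvBlockOK k := by
    refine ⟨k, hk, k.length, ?_, le_rfl, by simp⟩
    have := pvKeys_ne_nil k hk
    cases k with
    | nil => exact absurd rfl this
    | cons a b => simp
  have hpne : p ≠ [] := by
    rcases hs with rfl | ⟨j, bs, hj, ⟨hall, k', hk', hlast⟩, rfl⟩
    · exact hx
    · have hk'bs : k' ∈ bs := List.mem_of_getLast? hlast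
      have hk'ne : k' ≠ [] := pvKeys_ne_nil k' hk'
      intro hcontra
      rw [List.append_eq_nil_iff] at hcontra
      exact hk'ne (List.flatten_eq_nil_iff.mp hcontra.2 _ hk'bs)
  rcases pvRepl_prefix_back k r v p hpne hp with h1 | ⟨j', hj', hpk⟩
  · exact ⟨p, hs, h1⟩
  · refine ⟨p.take j' ++ k, ?_, hpk⟩
    rcases hs with rfl | ⟨j, bs, hj, ⟨hall, kl, hkl, hlast⟩, rfl⟩
    · exact Or.inr ⟨j', [k], hj', ⟨by simpa using hkblock, k, hk, rfl⟩, by simp⟩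
    · have hlenxj : (x.take j).length = j := by simp; omega
      by_cases hcase : j' ≤ j
      · refine Or.inr ⟨j', [k], lt_of_le_of_lt hcase hj, ⟨by simpa using hkblock, k, hk, rfl⟩, ?_⟩
        rw [List.take_append, List.take_take, min_eq_left hcase, hlenxj,
            Nat.sub_eq_zero_of_le hcase]
        simp
      · rw [not_le] at hcase
        obtain ⟨bs', hb', hf⟩ := pvChain_take bs hall (j' - j)
        refine Or.inr ⟨j, bs' ++ [k], hj, ⟨?_, k, hk, by simp⟩, ?_⟩
        · intro b hb
          rcases List.mem_append.mp hb with h | h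
          · exact hb' b h
          · rw [List.mem_singleton.mp h]
            exact hkblock
        · rw [List.flatten_append, List.take_append,
              List.take_of_length_le (l := x.take j) (by rw [hlenxj]; omega), hlenxj, ← hf]
          simp [List.append_assoc]

def pvApply (ps : List (List Char × List Char)) (s : List Char) : List Char :=
  ps.foldl (fun s p => pvRepl p.1 p.2 s) s

lemma pvApply_concat (ps : List (List Char × List Char)) (q : List Char × List Char)
    (s : List Char) : pvApply (ps ++ [q]) s = pvRepl q.1 q.2 (pvApply ps s) := by
  simp [pvApply, List.foldl_append]

lemma pvApply_nil : ∀ (ps : List (List Char × List Char)), pvApply ps [] = []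
  | [] => rfl
  | p :: ps => by
    show pvApply ps (pvRepl p.1 p.2 []) = []
    rw [pvRepl_nil]
    exact pvApply_nil ps

lemma pvPush (ps : List (List Char × List Char)) :
    (∀ p ∈ ps, p.1 ∈ pvKeyStrs) →
    ∀ (u x p : List Char), x ≠ [] → pvShape x p → p <+: pvApply ps u →
      ∃ p', pvShape x p' ∧ p' <+: u := by
  induction ps using List.reverseRecOn with
  | nil => exact fun _ u x p _ hs hp => ⟨p, hs, hp⟩
  | append_singleton ps q ih =>
    intro hps u x p hx hs hp
    rw [pvApply_concat] at hp
    obtain ⟨p₁, hs₁, hp₁⟩ := pvShape_closed q.1 q.2 x p _ (hps q (by simp)) hx hs hp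
    exact ih (fun y hy => hps y (List.mem_append_left _ hy)) u x p₁ hx hs₁ hp₁

-- a prefix of the tail extends to a prefix with the head block
lemma pv_prefix_append_both {a x t : List Char} (h : x <+: t) : a ++ x <+: a ++ t := by
  obtain ⟨tl, rfl⟩ := h
  exact ⟨tl, by rw [List.append_assoc]⟩

lemma pvApply_no_match (ps : List (List Char × List Char)) :
    (∀ p ∈ ps, p.1 ∈ pvKeyStrs) → ∀ (c : Char) (cs : List Char),
    (∀ h ∈ pvHazards, ¬ h <:+: (c :: cs)) →
    (∀ p ∈ ps, ¬ p.1 <+: (c :: cs)) →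
    pvApply ps (c :: cs) = c :: pvApply ps cs := by
  induction ps using List.reverseRecOn with
  | nil => intros; rfl
  | append_singleton ps q ih =>
    intro hps c cs hnh hnm
    have hsub : ∀ p ∈ ps, p.1 ∈ pvKeyStrs := fun y hy => hps y (List.mem_append_left _ hy)
    rw [pvApply_concat, pvApply_concat,
        ih hsub c cs hnh (fun y hy => hnm y (List.mem_append_left _ hy))]
    have hq1 : q.1 ∈ pvKeyStrs := hps q (by simp)
    have hqm : q ∈ ps ++ [q] := by simp
    rw [pvRepl_cons]
    rw [if_neg ?hno]
    case hno =>
      intro hcontra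
      have hpre : q.1 <+: c :: pvApply ps cs := List.isPrefixOf_iff_prefix.mp hcontra
      have hqne := pvKeys_ne_nil _ hq1
      cases hq : q.1 with
      | nil => exact hqne hq
      | cons a x =>
        rw [hq, List.cons_prefix_cons] at hpre
        obtain ⟨rfl, hxw⟩ := hpre
        by_cases hxnil : x = []
        · subst hxnil
          exact hnm q hqm (by rw [hq]; exact List.cons_prefix_cons.mpr ⟨rfl, List.nil_prefix⟩)
        · obtain ⟨p', hshape, hpt⟩ := pvPush ps hsub cs x x hxnil (Or.inl rfl) hxw
          rcases hshape with rfl | ⟨j, bs, hj, ⟨hall, klast, hklast, hlast⟩, rfl⟩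
          · exact hnm q hqm (by rw [hq]; exact List.cons_prefix_cons.mpr ⟨rfl, hpt⟩)
          · cases bs with
            | nil => simp at hlast
            | cons b bs2 =>
              cases bs2 with
              | nil =>
                have hbk : b = klast := by simpa using hlast
                subst hbk
                have hmem : (q.1.take (j+1) ++ b) ∈ pvHazards := by
                  refine pvHaz_mem hq1 hklast (by omega) ?_
                  rw [hq]
                  simp
                  omega
                refine hnh _ hmem ?_
                have hstep : a :: (x.take j ++ List.flatten [b]) <+: a :: cs :=
                  List.cons_prefix_cons.mpr ⟨rfl, hpt⟩
                have heq : a :: (x.take j ++ List.flatten [b]) = q.1.take (j+1) ++ b := by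
                  rw [hq, List.take_succ_cons]
                  simp
                exact (heq ▸ hstep).isInfix
              | cons b2 bs3 =>
                obtain ⟨h', hm', hinf⟩ := pvChain_haz _ ⟨hall, klast, hklast, hlast⟩ (by simp)
                refine hnh h' hm' ?_
                have h1 : (b :: b2 :: bs3).flatten <:+: x.take j ++ (b :: b2 :: bs3).flatten :=
                  (List.suffix_append _ _).isInfix
                exact ((hinf.trans h1).trans hpt.isInfix).trans (List.suffix_cons a cs).isInfix

def pvCondB (q p : List Char × List Char) : Bool :=
  (!decide (p.1 <:+: q.2)) &&
  (List.range' 1 q.2.length).all (fun l₀ =>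
    (!decide (q.2.drop (q.2.length - l₀) = p.1.take l₀)) || (!decide (l₀ ≤ p.1.length)) ||
    (decide (l₀ < p.1.length) && decide (l₀ < q.1.length) &&
      decide (q.1.drop (q.1.length - l₀) = p.1.take l₀)))

lemma pvPairCond_true : pvPairs.Pairwise (fun q p => pvCondB q p = true) := by decide

lemma pvCondB_spec (q p : List Char × List Char) (h : pvCondB q p = true) :
    (¬ p.1 <:+: q.2) ∧ ∀ l₀, 1 ≤ l₀ → l₀ ≤ q.2.length →
      q.2.drop (q.2.length - l₀) = p.1.take l₀ → l₀ ≤ p.1.length →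
      l₀ < p.1.length ∧ l₀ < q.1.length ∧ q.1.drop (q.1.length - l₀) = p.1.take l₀ := by
  rw [pvCondB, Bool.and_eq_true, List.all_eq_true] at h
  obtain ⟨h1, h2⟩ := h
  refine ⟨by simpa using h1, ?_⟩
  intro l₀ hl1 hl2 heq hle
  have hmem := h2 l₀ (List.mem_range'_1.mpr ⟨hl1, by omega⟩)
  rw [show (!decide (q.2.drop (q.2.length - l₀) = p.1.take l₀)) = false from by simp [heq],
      show (!decide (l₀ ≤ p.1.length)) = false from by simp [hle]] at hmem
  simp only [Bool.false_or] at hmem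
  rw [Bool.and_eq_true, Bool.and_eq_true] at hmem
  exact ⟨of_decide_eq_true hmem.1.1, of_decide_eq_true hmem.1.2, of_decide_eq_true hmem.2⟩

-- processing the earlier pairs leaves a leading key occurrence untouched
lemma pvApply_before (P₁ : List (List Char × List Char)) :
    (∀ p ∈ P₁, p.1 ∈ pvKeyStrs) → ∀ (kj t : List Char), kj ∈ pvKeyStrs →
    (∀ h ∈ pvHazards, ¬ h <:+: (kj ++ t)) →
    (∀ p ∈ P₁, ¬ p.1 <+: (kj ++ t)) →
    (∀ p ∈ P₁, p.1 ≠ kj) →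
    pvApply P₁ (kj ++ t) = kj ++ pvApply P₁ t := by
  induction P₁ using List.reverseRecOn with
  | nil => intros; rfl
  | append_singleton P₁ q ih =>
    intro hsub kj t hkj hnh hfst hnotin
    have hsub' : ∀ p ∈ P₁, p.1 ∈ pvKeyStrs := fun y hy => hsub y (List.mem_append_left _ hy)
    rw [pvApply_concat, pvApply_concat,
        ih hsub' kj t hkj hnh (fun y hy => hfst y (List.mem_append_left _ hy))
          (fun y hy => hnotin y (List.mem_append_left _ hy))]
    apply pvRepl_append
    intro d hd hpre
    have hkq : q.1 ∈ pvKeyStrs := hsub q (by simp)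
    have hne : q.1 ≠ kj := hnotin q (by simp)
    have hmlen : (List.drop d kj).length = kj.length - d := by simp
    by_cases hlen : q.1.length ≤ kj.length - d
    · have h1 : q.1 <+: kj.drop d := by
        have hq1 := List.prefix_iff_eq_take.mp hpre
        rw [List.take_append, show q.1.length - (List.drop d kj).length = 0 from by omega] at hq1
        simp only [List.take_zero, List.append_nil] at hq1
        rw [hq1]
        exact List.take_prefix _ _
      exact pvKeys_noinfix q.1 hkq kj hkj hne (h1.isInfix.trans (List.drop_suffix d kj).isInfix)
    · rw [not_le] at hlen
      have hdropm : kj.drop d = q.1.take (kj.length - d) := by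
        have hq1 := List.prefix_iff_eq_take.mp hpre
        conv_rhs => rw [hq1]
        rw [List.take_take, min_eq_left (by omega), List.take_append_of_le_length (by simp),
            List.take_of_length_le (by simp)]
      have hext : q.1.drop (kj.length - d) <+: pvApply P₁ t := by
        obtain ⟨tl, htl⟩ := hpre
        refine ⟨tl, ?_⟩
        have hdall := congrArg (List.drop (List.drop d kj).length) htl
        rw [List.drop_append_of_le_length (by simp; omega), List.drop_left] at hdall
        rw [hmlen] at hdall
        exact hdall
      have hKID : kj.drop d ++ q.1.drop (kj.length - d) = q.1 := by
        rw [hdropm]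
        exact List.take_append_drop _ _
      have hxne : q.1.drop (kj.length - d) ≠ [] := by
        intro hc
        have := congrArg List.length hc
        simp at this
        omega
      obtain ⟨p', hshape, hpt⟩ := pvPush P₁ hsub' t _ _ hxne (Or.inl rfl) hext
      rcases hshape with heqp | ⟨j, bs, hj, ⟨hall, klast, hklast, hlast⟩, rfl⟩
      · have hpref : kj ++ q.1.drop (kj.length - d) <+: kj ++ t :=
          pv_prefix_append_both (heqp ▸ hpt)
        have heq : kj ++ q.1.drop (kj.length - d) = kj.take d ++ q.1 := by
          calc kj ++ q.1.drop (kj.length - d)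
              = (kj.take d ++ kj.drop d) ++ q.1.drop (kj.length - d) := by
                rw [List.take_append_drop]
            _ = kj.take d ++ (kj.drop d ++ q.1.drop (kj.length - d)) := by
                rw [List.append_assoc]
            _ = kj.take d ++ q.1 := by rw [hKID]
        by_cases hd0 : d = 0
        · subst hd0
          simp only [List.take_zero, List.nil_append] at heq
          exact hfst q (by simp) (heq ▸ hpref)
        · exact hnh _ (pvHaz_mem hkj hkq (by omega) (by omega)) (heq ▸ hpref).isInfix
      · cases bs with
        | nil => simp at hlast
        | cons b bs2 =>
          cases bs2 with
          | nil =>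
            have hbk : b = klast := by simpa using hlast
            subst hbk
            have hxlen : (q.1.drop (kj.length - d)).length = q.1.length - (kj.length - d) := by
              simp
            have hq1take : q.1.take (kj.length - d + j)
                = kj.drop d ++ (q.1.drop (kj.length - d)).take j := by
              conv_lhs => rw [← hKID]
              rw [List.take_append, List.take_of_length_le (by rw [hmlen]; omega), hmlen,
                  Nat.add_sub_cancel_left]
            have hpref : kj ++ ((q.1.drop (kj.length - d)).take j ++ List.flatten [b]) <+: kj ++ t :=
              pv_prefix_append_both hpt
            have heq : kj ++ ((q.1.drop (kj.length - d)).take j ++ List.flatten [b])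
                = kj.take d ++ (q.1.take (kj.length - d + j) ++ b) := by
              calc kj ++ ((q.1.drop (kj.length - d)).take j ++ List.flatten [b])
                  = (kj.take d ++ kj.drop d) ++ ((q.1.drop (kj.length - d)).take j ++ b) := by
                    rw [List.take_append_drop]
                    simp
                _ = kj.take d ++ ((kj.drop d ++ (q.1.drop (kj.length - d)).take j) ++ b) := by
                    simp only [List.append_assoc]
                _ = kj.take d ++ (q.1.take (kj.length - d + j) ++ b) := by rw [← hq1take]
            have hmem : (q.1.take (kj.length - d + j) ++ b) ∈ pvHazards := by
              refine pvHaz_mem hkq hklast (by omega) ?_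
              rw [hxlen] at hj
              omega
            refine hnh _ hmem ?_
            have hsfx : (q.1.take (kj.length - d + j) ++ b)
                <:+: kj.take d ++ (q.1.take (kj.length - d + j) ++ b) :=
              (List.suffix_append _ _).isInfix
            exact hsfx.trans (heq ▸ hpref).isInfix
          | cons b2 bs3 =>
            obtain ⟨h', hm', hinf⟩ := pvChain_haz _ ⟨hall, klast, hklast, hlast⟩ (by simp)
            refine hnh h' hm' ?_
            have h1 : (b :: b2 :: bs3).flatten
                <:+: (q.1.drop (kj.length - d)).take j ++ (b :: b2 :: bs3).flatten :=
              (List.suffix_append _ _).isInfix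
            exact ((hinf.trans h1).trans hpt.isInfix).trans (List.suffix_append kj t).isInfix

-- processing the later pairs leaves the substituted block untouched
lemma pvApply_after (P₂ : List (List Char × List Char)) :
    (∀ p ∈ P₂, p.1 ∈ pvKeyStrs) → ∀ (kj rj t : List Char), kj ∈ pvKeyStrs →
    (∀ h ∈ pvHazards, ¬ h <:+: (kj ++ t)) →
    (∀ p ∈ P₂, pvCondB (kj, rj) p = true) →
    ∀ (Q : List (List Char × List Char)), (∀ p ∈ Q, p.1 ∈ pvKeyStrs) →
      pvApply P₂ (rj ++ pvApply Q t) = rj ++ pvApply (Q ++ P₂) t := by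
  induction P₂ using List.reverseRecOn with
  | nil => intro _ kj rj t _ _ _ Q _; simp [pvApply]
  | append_singleton P₂ q ih =>
    intro hsub kj rj t hkj hnh hcond Q hQ
    have hsub' : ∀ p ∈ P₂, p.1 ∈ pvKeyStrs := fun y hy => hsub y (List.mem_append_left _ hy)
    rw [pvApply_concat,
        ih hsub' kj rj t hkj hnh (fun y hy => hcond y (List.mem_append_left _ hy)) Q hQ,
        ← List.append_assoc, pvApply_concat]
    have hQP : ∀ p ∈ Q ++ P₂, p.1 ∈ pvKeyStrs := by
      intro y hy
      rcases List.mem_append.mp hy with h | h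
      · exact hQ y h
      · exact hsub' y h
    have hkq : q.1 ∈ pvKeyStrs := hsub q (by simp)
    obtain ⟨hnoinf, hcpl⟩ := pvCondB_spec (kj, rj) q (hcond q (by simp))
    dsimp only at hnoinf hcpl
    apply pvRepl_append
    intro d hd hpre
    have hmlen : (List.drop d rj).length = rj.length - d := by simp
    by_cases hlen : q.1.length ≤ rj.length - d
    · have h1 : q.1 <+: rj.drop d := by
        have hq1 := List.prefix_iff_eq_take.mp hpre
        rw [List.take_append, show q.1.length - (List.drop d rj).length = 0 from by omega] at hq1
        simp only [List.take_zero, List.append_nil] at hq1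
        rw [hq1]
        exact List.take_prefix _ _
      exact hnoinf (h1.isInfix.trans (List.drop_suffix d rj).isInfix)
    · rw [not_le] at hlen
      have hdropm : rj.drop d = q.1.take (rj.length - d) := by
        have hq1 := List.prefix_iff_eq_take.mp hpre
        conv_rhs => rw [hq1]
        rw [List.take_take, min_eq_left (by omega), List.take_append_of_le_length (by simp),
            List.take_of_length_le (by simp)]
      obtain ⟨hlp, hlkj, hcouple⟩ := hcpl (rj.length - d) (by omega) (by omega)
        (by rw [show rj.length - (rj.length - d) = d from by omega]; exact hdropm) (by omega)
      have hext : q.1.drop (rj.length - d) <+: pvApply (Q ++ P₂) t := by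
        obtain ⟨tl, htl⟩ := hpre
        refine ⟨tl, ?_⟩
        have hdall := congrArg (List.drop (List.drop d rj).length) htl
        rw [List.drop_append_of_le_length (by simp; omega), List.drop_left] at hdall
        rw [hmlen] at hdall
        exact hdall
      have hKID : q.1.take (rj.length - d) ++ q.1.drop (rj.length - d) = q.1 :=
        List.take_append_drop _ _
      have hxne : q.1.drop (rj.length - d) ≠ [] := by
        intro hc
        have := congrArg List.length hc
        simp at this
        omega
      obtain ⟨p', hshape, hpt⟩ := pvPush (Q ++ P₂) hQP t _ _ hxne (Or.inl rfl) hext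
      have hsplitkj : kj = kj.take (kj.length - (rj.length - d)) ++ q.1.take (rj.length - d) := by
        rw [← hcouple]
        exact (List.take_append_drop _ _).symm
      rcases hshape with heqp | ⟨j, bs, hj, ⟨hall, klast, hklast, hlast⟩, rfl⟩
      · have hpref : kj ++ q.1.drop (rj.length - d) <+: kj ++ t :=
          pv_prefix_append_both (heqp ▸ hpt)
        have heq : kj ++ q.1.drop (rj.length - d)
            = kj.take (kj.length - (rj.length - d)) ++ q.1 := by
          calc kj ++ q.1.drop (rj.length - d)
              = (kj.take (kj.length - (rj.length - d)) ++ q.1.take (rj.length - d))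
                  ++ q.1.drop (rj.length - d) := by rw [← hsplitkj]
            _ = kj.take (kj.length - (rj.length - d))
                  ++ (q.1.take (rj.length - d) ++ q.1.drop (rj.length - d)) := by
                rw [List.append_assoc]
            _ = kj.take (kj.length - (rj.length - d)) ++ q.1 := by rw [hKID]
        exact hnh _ (pvHaz_mem hkj hkq (by omega) (by omega)) (heq ▸ hpref).isInfix
      · cases bs with
        | nil => simp at hlast
        | cons b bs2 =>
          cases bs2 with
          | nil =>
            have hbk : b = klast := by simpa using hlast
            subst hbk
            have hxlen : (q.1.drop (rj.length - d)).length = q.1.length - (rj.length - d) := by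
              simp
            have hq1take : q.1.take (rj.length - d + j)
                = q.1.take (rj.length - d) ++ (q.1.drop (rj.length - d)).take j := by
              have hlt : (q.1.take (rj.length - d)).length = rj.length - d := by
                rw [List.length_take]
                omega
              conv_lhs => rw [← hKID]
              rw [List.take_append, List.take_of_length_le (by rw [hlt]; omega), hlt,
                  Nat.add_sub_cancel_left]
            have hpref : kj ++ ((q.1.drop (rj.length - d)).take j ++ List.flatten [b]) <+: kj ++ t :=
              pv_prefix_append_both hpt
            have heq : kj ++ ((q.1.drop (rj.length - d)).take j ++ List.flatten [b])
                = kj.take (kj.length - (rj.length - d)) ++ (q.1.take (rj.length - d + j) ++ b) := by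
              calc kj ++ ((q.1.drop (rj.length - d)).take j ++ List.flatten [b])
                  = (kj.take (kj.length - (rj.length - d)) ++ q.1.take (rj.length - d))
                      ++ ((q.1.drop (rj.length - d)).take j ++ b) := by
                    rw [← hsplitkj]
                    simp
                _ = kj.take (kj.length - (rj.length - d))
                      ++ ((q.1.take (rj.length - d) ++ (q.1.drop (rj.length - d)).take j) ++ b) := by
                    simp only [List.append_assoc]
                _ = kj.take (kj.length - (rj.length - d))
                      ++ (q.1.take (rj.length - d + j) ++ b) := by rw [← hq1take]
            have hmem : (q.1.take (rj.length - d + j) ++ b) ∈ pvHazards := by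
              refine pvHaz_mem hkq hklast (by omega) ?_
              rw [hxlen] at hj
              omega
            refine hnh _ hmem ?_
            have hsfx : (q.1.take (rj.length - d + j) ++ b)
                <:+: kj.take (kj.length - (rj.length - d)) ++ (q.1.take (rj.length - d + j) ++ b) :=
              (List.suffix_append _ _).isInfix
            exact hsfx.trans (heq ▸ hpref).isInfix
          | cons b2 bs3 =>
            obtain ⟨h', hm', hinf⟩ := pvChain_haz _ ⟨hall, klast, hklast, hlast⟩ (by simp)
            refine hnh h' hm' ?_
            have h1 : (b :: b2 :: bs3).flatten
                <:+: (q.1.drop (rj.length - d)).take j ++ (b :: b2 :: bs3).flatten :=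
              (List.suffix_append _ _).isInfix
            exact ((hinf.trans h1).trans hpt.isInfix).trans (List.suffix_append kj t).isInfix

lemma pvApply_match (P₁ P₂ : List (List Char × List Char)) (kj rj t : List Char)
    (hsplit : pvPairs = P₁ ++ (kj, rj) :: P₂)
    (hnh : ∀ h ∈ pvHazards, ¬ h <:+: (kj ++ t))
    (hfst : ∀ p ∈ P₁, ¬ p.1 <+: (kj ++ t)) :
    pvApply pvPairs (kj ++ t) = rj ++ pvApply pvPairs t := by
  have hmemkj : (kj, rj) ∈ pvPairs := by rw [hsplit]; simp
  have hkj : kj ∈ pvKeyStrs := pvAllKeys _ hmemkj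
  have hkjne : kj ≠ [] := pvKeys_ne_nil _ hkj
  have hsub1 : ∀ p ∈ P₁, p.1 ∈ pvKeyStrs := by
    intro p hp
    exact pvAllKeys p (by rw [hsplit]; exact List.mem_append_left _ hp)
  have hsub2 : ∀ p ∈ P₂, p.1 ∈ pvKeyStrs := by
    intro p hp
    exact pvAllKeys p (by rw [hsplit]; exact List.mem_append_right _ (List.mem_cons_of_mem _ hp))
  have hnotin : ∀ p ∈ P₁, p.1 ≠ kj := by
    intro p hp heq
    have hnd := pvKeys_nodup
    rw [hsplit, List.map_append, List.map_cons, List.nodup_append] at hnd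
    exact hnd.2.2 p.1 (List.mem_map_of_mem hp) kj (by simp) heq
  have hcond : ∀ p ∈ P₂, pvCondB (kj, rj) p = true := by
    have hpw := pvPairCond_true
    rw [hsplit] at hpw
    exact (List.pairwise_cons.mp (List.pairwise_append.mp hpw).2.1).1
  conv_lhs => rw [hsplit]
  rw [show P₁ ++ (kj, rj) :: P₂ = (P₁ ++ [(kj, rj)]) ++ P₂ from by simp]
  rw [show pvApply ((P₁ ++ [(kj, rj)]) ++ P₂) (kj ++ t)
      = pvApply P₂ (pvApply (P₁ ++ [(kj, rj)]) (kj ++ t)) from by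
    simp [pvApply, List.foldl_append]]
  rw [pvApply_concat, pvApply_before P₁ hsub1 kj t hkj hnh hfst hnotin,
      pvRepl_head kj rj _ hkjne]
  rw [show rj ++ pvRepl kj rj (pvApply P₁ t) = rj ++ pvApply (P₁ ++ [(kj, rj)]) t from by
    rw [pvApply_concat]]
  rw [pvApply_after P₂ hsub2 kj rj t hkj hnh hcond (P₁ ++ [(kj, rj)]) ?hQ]
  · rw [hsplit]
    simp
  case hQ =>
    intro p hp
    rcases List.mem_append.mp hp with h | h
    · exact hsub1 p h
    · rw [List.mem_singleton.mp h]
      exact hkj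

lemma pvOnePass_nil : pvOnePass [] = [] := by rw [pvOnePass]

lemma pvOnePass_cons (c : Char) (t : List Char) :
    pvOnePass (c :: t) =
      match pvPairs.find? (fun p => p.1.isPrefixOf (c :: t)) with
      | some (k, r) => r ++ pvOnePass (t.drop (k.length - 1))
      | none => c :: pvOnePass t := by
  rw [pvOnePass]

lemma pvMainAux : ∀ (n : Nat) (s : List Char), s.length ≤ n →
    (∀ h ∈ pvHazards, ¬ h <:+: s) → pvApply pvPairs s = pvOnePass s := by
  intro n
  induction n with
  | zero =>
    intro s hs _
    have : s = [] := List.length_eq_zero_iff.mp (Nat.le_zero.mp hs)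
    subst this
    rw [pvApply_nil, pvOnePass_nil]
  | succ n ih =>
    intro s hs hnh
    cases s with
    | nil => rw [pvApply_nil, pvOnePass_nil]
    | cons c t =>
      cases hfind : pvPairs.find? (fun p => p.1.isPrefixOf (c :: t)) with
      | none =>
        have hnm : ∀ p ∈ pvPairs, ¬ p.1 <+: (c :: t) := by
          intro p hp hpre
          exact (List.find?_eq_none.mp hfind p hp) (List.isPrefixOf_iff_prefix.mpr hpre)
        have h1 : pvOnePass (c :: t) = c :: pvOnePass t := by
          rw [pvOnePass_cons, hfind]
        rw [h1, pvApply_no_match pvPairs pvAllKeys c t hnh hnm,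
            ih t (by simp at hs; omega)
              (fun h hm hi => hnh h hm (hi.trans (List.suffix_cons c t).isInfix))]
      | some kr =>
        obtain ⟨k, r⟩ := kr
        obtain ⟨hpred, P₁, P₂, hsplit, hbefore⟩ := List.find?_eq_some_iff_append.mp hfind
        have hkmem : (k, r) ∈ pvPairs := by rw [hsplit]; simp
        have hkne : k ≠ [] := pvKeys_ne_nil _ (pvAllKeys _ hkmem)
        have hkpre : k <+: c :: t := List.isPrefixOf_iff_prefix.mp (by simpa using hpred)
        obtain ⟨rest, hrest⟩ := hkpre
        have hfst : ∀ p ∈ P₁, ¬ p.1 <+: (k ++ rest) := by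
          intro p hp hpre
          have hb := hbefore p hp
          rw [hrest] at hpre
          have hT : p.1.isPrefixOf (c :: t) = true := List.isPrefixOf_iff_prefix.mpr hpre
          rw [hT] at hb
          simp at hb
        have hdrop : t.drop (k.length - 1) = rest := by
          cases k with
          | nil => exact absurd rfl hkne
          | cons a k' =>
            have h1 : a = c ∧ k' ++ rest = t := by
              rw [List.cons_append] at hrest
              exact ⟨(List.cons.injEq _ _ _ _).mp hrest |>.1, (List.cons.injEq _ _ _ _).mp hrest |>.2⟩
            rw [← h1.2]
            simp
        have hlenrest : rest.length ≤ n := by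
          have := congrArg List.length hrest
          simp at this hs
          cases k with
          | nil => exact absurd rfl hkne
          | cons a k' => simp at this; omega
        have h1 : pvOnePass (c :: t) = r ++ pvOnePass (t.drop (k.length - 1)) := by
          rw [pvOnePass_cons, hfind]
        rw [h1, hdrop, ← hrest,
            pvApply_match P₁ P₂ k r rest hsplit (by rw [hrest]; exact hnh) hfst,
            ih rest hlenrest (by
              intro h hm hi
              refine hnh h hm (hi.trans ?_)
              rw [← hrest]
              exact (List.suffix_append k rest).isInfix)]

lemma pvMain (s : List Char) (hnh : ∀ h ∈ pvHazards, ¬ h <:+: s) :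
    pvApply pvPairs s = pvOnePass s :=
  pvMainAux s.length s le_rfl hnh

lemma pvFold_toList : ∀ (ps : List (String × String)) (s : String),
    (∀ p ∈ ps, p.1.toList ≠ []) →
    (ps.foldl (fun s p => PySem.Str.replace s p.1 p.2) s).toList
      = pvApply (ps.map (fun p => (p.1.toList, p.2.toList))) s.toList
  | [], s, _ => rfl
  | q :: ps, s, h => by
    rw [List.foldl_cons, List.map_cons]
    rw [show pvApply ((q.1.toList, q.2.toList) :: ps.map (fun p => (p.1.toList, p.2.toList))) s.toList
        = pvApply (ps.map (fun p => (p.1.toList, p.2.toList))) (pvRepl q.1.toList q.2.toList s.toList) from rfl]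
    rw [pvFold_toList ps _ (fun p hp => h p (List.mem_cons_of_mem _ hp))]
    congr 1
    rw [PySem.Str.toList_replace, pv_replace_eq _ _ _ (h q (by simp))]

lemma pvPre_haz (name : String) (hp : Pre_shorten_tournament_name_py name) :
    ∀ h ∈ pvHazards, ¬ h <:+: name.toList := by
  intro h hm
  unfold pvHazards at hm
  rw [List.mem_flatMap] at hm
  obtain ⟨k, hk, hm⟩ := hm
  rw [List.mem_flatMap] at hm
  obtain ⟨l, hl, hm⟩ := hm
  rw [List.mem_map] at hm
  obtain ⟨k', hk', rfl⟩ := hm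
  exact hp k hk k' hk' l hl

-- ===== VERDICT (by name: the statement is the Claim_ definition above) =====
theorem shorten_tournament_name_py_spec : Claim_equal_shorten_tournament_name_py := by
  intro name _ hpre0
  have hpre := pvPre_haz name hpre0
  unfold Spec_shorten_tournament_name_py
  unfold shorten_tournament_name_py shorten_tournament_name_py_alt
  have hcore : pvStrPairs.foldl (fun s p => PySem.Str.replace s p.1 p.2) name
      = String.ofList (pvOnePass name.toList) := by
    rw [← String.toList_inj, String.toList_ofList,
        pvFold_toList pvStrPairs name (by decide),
        show pvStrPairs.map (fun p => (p.1.toList, p.2.toList)) = pvPairs from rfl,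
        pvMain name.toList hpre]
  rw [hcore]
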